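-- pv_equiv track=rewrite | github.com/rm234179/wordle_analysis | solve_wordle.py | get_most_unique_score_look_at_allowed_words
-- ===== SOURCE A (Python) =====
-- import string
-- from typing import Tuple, Dict, List, Set, Optional, Callable
--
-- def get_words_by_letter(words: Set[str]) -> Dict[chr, Set[str]]:
--     words_by_letter = {}
--     for letter in string.ascii_lowercase:
--         words_by_letter[letter] = set()
--     for word in words:
--         for letter in word:
--             words_by_letter[letter].add(word)
--     return words_by_letter
--
-- def get_most_unique_score_look_at_allowed_words(allowed_words: Set[str], all_words: Set[str],
--                           required_letters: Set[Tuple[chr, Optional[int]]],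
--                           exclude_letters: Set[Tuple[chr, Optional[int]]],
--                           ) -> List[Tuple[int, str]]:
--     scores_and_words = []
--     words_by_letter = get_words_by_letter(allowed_words)
--     # This section looks for and removes letters that are common among all words
--     num_allowed_words = len(allowed_words)
--     for letter in words_by_letter:
--         if len(words_by_letter[letter]) == num_allowed_words:
--             words_by_letter[letter] = set()
--     for word in allowed_words:
--         score = 0
--         tmp = set()
--         for letter in set(word):
--             tmp = tmp.union(words_by_letter[letter])
--         score += len(tmp)
--         scores_and_words.append((score, word))
--     best = sorted(scores_and_words, reverse=True)
--     return best
-- ===== SOURCE B (Python) =====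
-- def get_most_unique_score_look_at_allowed_words(allowed_words, all_words, required_letters, exclude_letters):
--     # Bitmask re-implementation: one 26-bit letter mask per word; a letter common to
--     # all words is dropped from every mask; a word's score is the number of words
--     # whose mask intersects its remaining mask.
--     ALL = (1 << 26) - 1
--     ORD_A = ord('a')
--     words = list(allowed_words)
--     masks = []
--     for w in words:
--         m = 0
--         for c in w:
--             m |= 1 << (ord(c) - ORD_A)
--         masks.append(m)
--     common = ALL
--     for m in masks:
--         common &= m
--     scores_and_words = []
--     for w, m in zip(words, masks):
--         r = m & (common ^ ALL)
--         score = sum(1 for m2 in masks if m2 & r)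
--         scores_and_words.append((score, w))
--     scores_and_words.sort(reverse=True)
--     return scores_and_words
-- ===== Notes on version B (the rewrite author's own statement) =====
-- stated objective: faster
-- what changed: Replaces A's 26 per-letter word-sets and per-word chained set unions by one 26-bit letter bitmask per word: universal letters are cleared with one AND fold, and each word's score is a count of words whose mask intersects its relevant-letter mask, avoiding all set construction and copying.
-- outside the precondition, e.g. on get_most_unique_score_look_at_allowed_words({'aB'}, set(), set(), set()): A raises KeyError, B raises ValueError
import Mathlib
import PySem

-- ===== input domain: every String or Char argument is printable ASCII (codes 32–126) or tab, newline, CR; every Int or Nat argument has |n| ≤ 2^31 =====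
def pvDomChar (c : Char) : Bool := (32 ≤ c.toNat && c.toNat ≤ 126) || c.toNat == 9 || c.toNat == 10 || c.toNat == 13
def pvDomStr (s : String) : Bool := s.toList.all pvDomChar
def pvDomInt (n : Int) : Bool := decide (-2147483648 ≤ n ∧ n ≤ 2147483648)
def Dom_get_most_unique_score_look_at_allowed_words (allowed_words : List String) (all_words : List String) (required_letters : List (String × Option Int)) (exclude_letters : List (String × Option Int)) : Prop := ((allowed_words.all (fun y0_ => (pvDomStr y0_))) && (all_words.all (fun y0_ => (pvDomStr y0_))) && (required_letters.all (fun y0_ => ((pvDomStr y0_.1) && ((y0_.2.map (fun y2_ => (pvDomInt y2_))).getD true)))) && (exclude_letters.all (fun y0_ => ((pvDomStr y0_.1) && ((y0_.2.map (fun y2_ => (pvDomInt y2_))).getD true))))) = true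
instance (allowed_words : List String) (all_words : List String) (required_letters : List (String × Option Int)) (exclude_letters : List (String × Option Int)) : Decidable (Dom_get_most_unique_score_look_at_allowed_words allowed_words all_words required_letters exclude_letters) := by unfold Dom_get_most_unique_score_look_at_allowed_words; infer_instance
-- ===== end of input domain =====

-- B replaces A's 26 per-letter word-sets and per-word set unions by one 26-bit letter
-- mask per word: a word's score is the number of words whose mask intersects its mask
-- restricted to non-universal letters (measured faster by a constant factor).
-- Both versions sort (score, word) pairs in descending order; the inputs are Python
-- sets, so the argument lists hold distinct elements (Pre_ states that invariant).

-- ===== PORT A =====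
-- string.ascii_lowercase
def pvAsciiLowercase : List Char := "abcdefghijklmnopqrstuvwxyz".toList

-- dict keyed by the single-character strings Python iterates; modelled with Char keys.
-- `words_by_letter[letter].add(word)` raises KeyError when letter is not a–z; Dict.modify
-- would insert there instead — those inputs are excluded by Pre_.
def get_words_by_letter (words : List String) : PySem.Dict Char (PySem.Set String) :=
  let words_by_letter : PySem.Dict Char (PySem.Set String) :=
    pvAsciiLowercase.foldl (fun d letter => d.insert letter PySem.Set.empty) PySem.Dict.empty
  words.foldl (fun d word =>
    word.toList.foldl (fun d letter =>
      d.modify letter PySem.Set.empty (fun s => PySem.Set.add s word)) d) words_by_letter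

def get_most_unique_score_look_at_allowed_words (allowed_words : List String) (all_words : List String) (required_letters : List (String × Option Int)) (exclude_letters : List (String × Option Int)) : List (Int × String) :=
  let scores_and_words : List (Int × String) := []
  let words_by_letter := get_words_by_letter allowed_words
  let num_allowed_words : Int := PySem.List.len allowed_words
  -- for letter in words_by_letter: if len(...) == num: zero the entry
  let words_by_letter := words_by_letter.keys.foldl (fun d letter =>
      if PySem.Set.len (d.getD letter PySem.Set.empty) == num_allowed_words
      then d.insert letter PySem.Set.empty else d) words_by_letter
  let scores_and_words := allowed_words.foldl (fun acc word =>
      let score : Int := 0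
      let tmp : PySem.Set String := PySem.Set.empty
      let tmp := (PySem.Set.ofList word.toList).foldl (fun tmp letter =>
          PySem.Set.union tmp (words_by_letter.getD letter PySem.Set.empty)) tmp
      let score := score + PySem.Set.len tmp
      acc ++ [(score, word)]) scores_and_words
  PySem.List.sorted2 scores_and_words (fun p => p.1) (fun p => p.2) true

-- ===== PORT B =====
def get_most_unique_score_look_at_allowed_words_alt (allowed_words : List String) (all_words : List String) (required_letters : List (String × Option Int)) (exclude_letters : List (String × Option Int)) : List (Int × String) :=
  let ALL : Int := (1 <<< 26) - 1
  let words := allowed_words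
  -- 1 << (ord(c) - 97): Python raises ValueError on a negative shift count (chars below
  -- 'a'); the .toNat clamp is only reached outside Pre_.
  let masks := words.foldl (fun masks w =>
      masks ++ [w.toList.foldl (fun m c =>
        PySem.Int.bor m ((1 : Int) <<< ((c.toNat : Int) - 97).toNat)) 0]) ([] : List Int)
  let common := masks.foldl (fun common m => PySem.Int.band common m) ALL
  let scores_and_words := (words.zip masks).foldl (fun acc wm =>
      let r := PySem.Int.band wm.2 (PySem.Int.bxor common ALL)
      let score : Int := (masks.map (fun m2 => if PySem.Int.band m2 r ≠ 0 then (1 : Int) else 0)).sum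
      acc ++ [(score, wm.1)]) ([] : List (Int × String))
  PySem.List.sorted2 scores_and_words (fun p => p.1) (fun p => p.2) true

-- ===== PRECONDITION & SPEC =====
-- Pre_ excludes (i) words with a character outside 'a'..'z' — there A raises KeyError
-- (and B raises ValueError for characters below 'a') — and (ii) duplicate-containing
-- lists, which cannot arise from the Python set arguments (representation invariant).
def Pre_get_most_unique_score_look_at_allowed_words (allowed_words : List String) (all_words : List String) (required_letters : List (String × Option Int)) (exclude_letters : List (String × Option Int)) : Prop :=
  allowed_words.Nodup ∧ (allowed_words.all (fun w => w.toList.all (fun c => decide ('a' ≤ c) && decide (c ≤ 'z')))) = true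
instance (allowed_words : List String) (all_words : List String) (required_letters : List (String × Option Int)) (exclude_letters : List (String × Option Int)) : Decidable (Pre_get_most_unique_score_look_at_allowed_words allowed_words all_words required_letters exclude_letters) := by unfold Pre_get_most_unique_score_look_at_allowed_words; infer_instance

def pvWitness_get_most_unique_score_look_at_allowed_words : List String × List String × (List (String × Option Int)) × (List (String × Option Int)) := (["ab", "bc"], [], [], [])

def Spec_get_most_unique_score_look_at_allowed_words (allowed_words : List String) (all_words : List String) (required_letters : List (String × Option Int)) (exclude_letters : List (String × Option Int)) (out : List (Int × String)) : Prop := out = get_most_unique_score_look_at_allowed_words_alt allowed_words all_words required_letters exclude_letters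
instance (allowed_words : List String) (all_words : List String) (required_letters : List (String × Option Int)) (exclude_letters : List (String × Option Int)) (out : List (Int × String)) : Decidable (Spec_get_most_unique_score_look_at_allowed_words allowed_words all_words required_letters exclude_letters out) := by unfold Spec_get_most_unique_score_look_at_allowed_words; infer_instance

-- ===== CLAIM (what is proved, stated in full; the proofs are below) =====
def Claim_equal_get_most_unique_score_look_at_allowed_words : Prop := ∀ (allowed_words : List String) (all_words : List String) (required_letters : List (String × Option Int)) (exclude_letters : List (String × Option Int)), Dom_get_most_unique_score_look_at_allowed_words allowed_words all_words required_letters exclude_letters → Pre_get_most_unique_score_look_at_allowed_words allowed_words all_words required_letters exclude_letters → Spec_get_most_unique_score_look_at_allowed_words allowed_words all_words required_letters exclude_letters (get_most_unique_score_look_at_allowed_words allowed_words all_words required_letters exclude_letters)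

-- ===== LEMMAS AND PROOFS =====

-- the common meeting point of both programs: a word w is scored by the number of
-- allowed words sharing with w some letter that is not contained in every allowed word
def pvRel (allowed : List String) (c : Char) : Bool := !allowed.all (fun u => u.toList.contains c)
def pvPredB (allowed : List String) (w w2 : String) : Bool := w.toList.any (fun c => w2.toList.contains c && pvRel allowed c)
def pvScore (allowed : List String) (w : String) : Nat := (allowed.filter (pvPredB allowed w)).length

theorem pv_char_eq (c d : Char) (h : c.toNat = d.toNat) : c = d := Char.ext (UInt32.toNat_inj.mp h)

theorem pv_mem_lowercase (c : Char) (h1 : 'a' ≤ c) (h2 : c ≤ 'z') : c ∈ pvAsciiLowercase := by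
  have e : pvAsciiLowercase = (List.range 26).map (fun i => Char.ofNat (97 + i)) := by decide
  have hn1 : 97 ≤ c.toNat := h1
  have hn2 : c.toNat ≤ 122 := h2
  rw [e]
  refine List.mem_map.mpr ⟨c.toNat - 97, List.mem_range.mpr (by omega), ?_⟩
  have : 97 + (c.toNat - 97) = c.toNat := by omega
  rw [this, Char.ofNat_toNat]

-- ---- A side ----
theorem pv_set_add_add (s : PySem.Set String) (x : String) :
    PySem.Set.add (PySem.Set.add s x) x = PySem.Set.add s x := by
  by_cases h : x ∈ s
  · simp [PySem.Set.add, h]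
  · simp [PySem.Set.add, h]

theorem pv_init_getD (l : List Char) (d : PySem.Dict Char (PySem.Set String)) (c : Char)
    (h : d.getD c PySem.Set.empty = PySem.Set.empty) :
    ((l.foldl (fun d letter => d.insert letter PySem.Set.empty) d).getD c PySem.Set.empty) = PySem.Set.empty := by
  induction l generalizing d with
  | nil => exact h
  | cons k l ih =>
      apply ih
      rw [PySem.Dict.getD_insert]
      split
      · rfl
      · exact h

theorem pv_inner_getD (w : String) (cs : List Char) (d : PySem.Dict Char (PySem.Set String)) (c : Char) :
    ((cs.foldl (fun d letter => d.modify letter PySem.Set.empty (fun s => PySem.Set.add s w)) d).getD c PySem.Set.empty)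
      = if c ∈ cs then PySem.Set.add (d.getD c PySem.Set.empty) w else d.getD c PySem.Set.empty := by
  induction cs generalizing d with
  | nil => simp
  | cons k cs ih =>
      simp only [List.foldl_cons, ih, PySem.Dict.getD_modify, List.mem_cons]
      by_cases hck : c = k
      · by_cases hcs : c ∈ cs
        · simp [hck, hcs, pv_set_add_add]
        · simp [hck, hcs]
      · by_cases hcs : c ∈ cs <;> simp [hck, hcs]

theorem pv_outer_getD (ws : List String) (d : PySem.Dict Char (PySem.Set String)) (c : Char) :
    ((ws.foldl (fun d word => word.toList.foldl (fun d letter =>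
        d.modify letter PySem.Set.empty (fun s => PySem.Set.add s word)) d) d).getD c PySem.Set.empty)
      = (ws.filter (fun w => w.toList.contains c)).foldl (fun s w => PySem.Set.add s w) (d.getD c PySem.Set.empty) := by
  induction ws generalizing d with
  | nil => simp
  | cons w ws ih =>
      simp only [List.foldl_cons, ih, pv_inner_getD, List.filter_cons]
      by_cases h : c ∈ w.toList
      · simp [h]
      · simp [h]

theorem pv_wbl_getD (words : List String) (c : Char) :
    (get_words_by_letter words).getD c PySem.Set.empty
      = PySem.Set.ofList (words.filter (fun w => w.toList.contains c)) := by
  unfold get_words_by_letter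
  rw [pv_outer_getD, pv_init_getD _ _ _ (by simp [PySem.Dict.getD_empty]), PySem.Set.ofList_eq_foldl]
  rfl

theorem pv_wbl_keys_nodup (words : List String) : (get_words_by_letter words).keys.Nodup := by
  unfold get_words_by_letter
  have h0 : (pvAsciiLowercase.foldl (fun d letter => d.insert letter PySem.Set.empty)
      (PySem.Dict.empty : PySem.Dict Char (PySem.Set String))).keys.Nodup :=
    PySem.Dict.nodup_keys_foldl_insert _ _ _ PySem.Dict.nodup_keys_empty
  generalize (pvAsciiLowercase.foldl (fun d letter => d.insert letter PySem.Set.empty)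
      (PySem.Dict.empty : PySem.Dict Char (PySem.Set String))) = d at h0 ⊢
  induction words generalizing d with
  | nil => exact h0
  | cons w ws ih =>
      apply ih
      exact PySem.Dict.nodup_keys_foldl_modify_key w.toList (fun c => c) PySem.Set.empty
        (fun _ _ s => PySem.Set.add s w) d h0

theorem pv_contains_mono_inner (w : String) (cs : List Char) (d : PySem.Dict Char (PySem.Set String)) (c : Char)
    (h : d.contains c = true) :
    (cs.foldl (fun d letter => d.modify letter PySem.Set.empty (fun s => PySem.Set.add s w)) d).contains c = true := by
  induction cs generalizing d with
  | nil => exact h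
  | cons k cs ih =>
      apply ih
      rw [PySem.Dict.contains_modify, h]
      simp

theorem pv_wbl_contains (words : List String) (c : Char) (h1 : 'a' ≤ c) (h2 : c ≤ 'z') :
    c ∈ (get_words_by_letter words).keys := by
  have hlc : c ∈ pvAsciiLowercase := pv_mem_lowercase c h1 h2
  rw [← PySem.Dict.contains_iff_mem_keys]
  unfold get_words_by_letter
  have h0 : (pvAsciiLowercase.foldl (fun d letter => d.insert letter PySem.Set.empty)
      (PySem.Dict.empty : PySem.Dict Char (PySem.Set String))).contains c = true := by
    rw [PySem.Dict.contains_iff_mem_keys, PySem.Dict.keys_foldl_insert]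
    show c ∈ PySem.Set.update PySem.Dict.empty.keys pvAsciiLowercase
    rw [PySem.Set.mem_update]
    exact Or.inr hlc
  generalize (pvAsciiLowercase.foldl (fun d letter => d.insert letter PySem.Set.empty)
      (PySem.Dict.empty : PySem.Dict Char (PySem.Set String))) = d at h0 ⊢
  induction words generalizing d with
  | nil => exact h0
  | cons w ws ih => exact ih _ (pv_contains_mono_inner w w.toList d c h0)

theorem pv_zero_fold (ks : List Char) (wbl : PySem.Dict Char (PySem.Set String)) (n : Int) :
    ∀ (d : PySem.Dict Char (PySem.Set String)), ks.Nodup →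
    (∀ k ∈ ks, d.getD k PySem.Set.empty = wbl.getD k PySem.Set.empty) → ∀ (c : Char),
    ((ks.foldl (fun d letter => if PySem.Set.len (d.getD letter PySem.Set.empty) == n
        then d.insert letter PySem.Set.empty else d) d).getD c PySem.Set.empty)
      = if c ∈ ks ∧ PySem.Set.len (wbl.getD c PySem.Set.empty) == n
        then PySem.Set.empty else d.getD c PySem.Set.empty := by
  induction ks with
  | nil => intro d _ _ c; simp
  | cons k ks ih =>
      intro d hnd hd c
      have hknotin : k ∉ ks := (List.nodup_cons.mp hnd).1
      have hdk : d.getD k PySem.Set.empty = wbl.getD k PySem.Set.empty := hd k (by simp)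
      simp only [List.foldl_cons]
      set d' := if PySem.Set.len (d.getD k PySem.Set.empty) == n
        then d.insert k PySem.Set.empty else d with hd'
      have hstep : ∀ k' ∈ ks, d'.getD k' PySem.Set.empty = wbl.getD k' PySem.Set.empty := by
        intro k' hk'
        have hne : k' ≠ k := fun h => hknotin (h ▸ hk')
        rw [hd']
        split
        · rw [PySem.Dict.getD_insert]
          simp only [hne, if_false]
          exact hd k' (by simp [hk'])
        · exact hd k' (by simp [hk'])
      rw [ih d' (List.nodup_cons.mp hnd).2 hstep c]
      by_cases hck : c = k
      · subst hck
        rw [if_neg (fun h => hknotin h.1)]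
        by_cases hlen : (PySem.Set.len (wbl.getD c PySem.Set.empty) == n) = true
        · rw [if_pos ⟨List.mem_cons_self, hlen⟩]
          have hd2 : d' = d.insert c PySem.Set.empty := by rw [hd', hdk, if_pos hlen]
          rw [hd2, PySem.Dict.getD_insert, if_pos rfl]
        · rw [if_neg (fun h => hlen h.2)]
          have hd2 : d' = d := by rw [hd', hdk, if_neg hlen]
          rw [hd2]
      · have hdc : d'.getD c PySem.Set.empty = d.getD c PySem.Set.empty := by
          rw [hd']; split
          · rw [PySem.Dict.getD_insert]; simp [hck]
          · rfl
        rw [hdc]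
        simp [List.mem_cons, hck]

theorem pv_union_fold_mem (cs : List Char) (g : Char → PySem.Set String) (t : PySem.Set String) (x : String) :
    x ∈ cs.foldl (fun t c => PySem.Set.union t (g c)) t ↔ x ∈ t ∨ ∃ c ∈ cs, x ∈ g c := by
  induction cs generalizing t with
  | nil => simp
  | cons c cs ih => simp [ih, PySem.Set.mem_union]; tauto

theorem pv_union_fold_nodup (cs : List Char) (g : Char → PySem.Set String) (t : PySem.Set String)
    (h : t.Nodup) : (cs.foldl (fun t c => PySem.Set.union t (g c)) t).Nodup := by
  induction cs generalizing t with
  | nil => exact h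
  | cons c cs ih => exact ih _ (PySem.Set.nodup_union _ _ h)

-- the zeroed dictionary of A, characterised on lowercase letters
def pvWbl2 (allowed : List String) : PySem.Dict Char (PySem.Set String) :=
  (get_words_by_letter allowed).keys.foldl (fun d letter =>
      if PySem.Set.len (d.getD letter PySem.Set.empty) == PySem.List.len allowed
      then d.insert letter PySem.Set.empty else d) (get_words_by_letter allowed)

theorem pv_wbl2_getD (allowed : List String) (hnd : allowed.Nodup) (c : Char)
    (h1 : 'a' ≤ c) (h2 : c ≤ 'z') :
    (pvWbl2 allowed).getD c PySem.Set.empty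
      = if pvRel allowed c then allowed.filter (fun w => w.toList.contains c) else PySem.Set.empty := by
  unfold pvWbl2
  rw [pv_zero_fold (get_words_by_letter allowed).keys (get_words_by_letter allowed)
      (PySem.List.len allowed) (get_words_by_letter allowed) (pv_wbl_keys_nodup allowed)
      (fun _ _ => rfl) c]
  have hmem : c ∈ (get_words_by_letter allowed).keys := pv_wbl_contains allowed c h1 h2
  have hof : (get_words_by_letter allowed).getD c PySem.Set.empty
      = allowed.filter (fun w => w.toList.contains c) := by
    rw [pv_wbl_getD]
    exact PySem.Set.ofList_eq_self_of_nodup _ (hnd.filter _)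
  by_cases hall : allowed.all (fun u => u.toList.contains c) = true
  · have hlen : (allowed.filter (fun w => w.toList.contains c)).length = allowed.length :=
      List.length_filter_eq_length_iff.mpr (by simpa using List.all_eq_true.mp hall)
    have hrel : pvRel allowed c = false := by unfold pvRel; rw [hall]; rfl
    have hcnd : (PySem.Set.len ((get_words_by_letter allowed).getD c PySem.Set.empty)
        == PySem.List.len allowed) = true := by
      rw [hof]; simp [PySem.Set.len, PySem.List.len_eq]
      intro a ha; simpa using List.all_eq_true.mp hall a ha
    rw [if_pos ⟨hmem, hcnd⟩, hrel]
    simp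
  · have hlen : (allowed.filter (fun w => w.toList.contains c)).length ≠ allowed.length := by
      intro hcontra
      exact hall (List.all_eq_true.mpr (by simpa using List.length_filter_eq_length_iff.mp hcontra))
    have hrel : pvRel allowed c = true := by
      unfold pvRel; rw [Bool.not_eq_true'] at *; rw [Bool.eq_false_iff]; simpa using hall
    have hcnd : (PySem.Set.len ((get_words_by_letter allowed).getD c PySem.Set.empty)
        == PySem.List.len allowed) = false := by
      rw [hof]; simp [PySem.Set.len, PySem.List.len_eq]
      obtain ⟨u, hu, hcu⟩ := List.all_eq_false.mp (Bool.eq_false_iff.mpr hall)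
      exact ⟨u, hu, fun hmemu => hcu (List.contains_iff_mem.mpr hmemu)⟩
    rw [if_neg (fun h => by rw [hcnd] at h; exact absurd h.2 (by simp)), hrel, if_pos rfl, hof]

theorem pv_tmp_score (allowed : List String) (hnd : allowed.Nodup)
    (hlc : ∀ u ∈ allowed, ∀ c ∈ u.toList, 'a' ≤ c ∧ c ≤ 'z') (w : String) (hw : w ∈ allowed) :
    PySem.Set.len ((PySem.Set.ofList w.toList).foldl (fun tmp letter =>
        PySem.Set.union tmp ((pvWbl2 allowed).getD letter PySem.Set.empty)) PySem.Set.empty)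
      = (pvScore allowed w : Int) := by
  set tmp := (PySem.Set.ofList w.toList).foldl (fun tmp letter =>
      PySem.Set.union tmp ((pvWbl2 allowed).getD letter PySem.Set.empty)) PySem.Set.empty with htmp
  have hmem : ∀ x, x ∈ tmp ↔ x ∈ allowed.filter (pvPredB allowed w) := by
    intro x
    rw [htmp, pv_union_fold_mem, List.mem_filter]
    constructor
    · rintro (hx | ⟨c, hc, hx⟩)
      · exact absurd hx (List.not_mem_nil)
      · rw [PySem.Set.mem_ofList] at hc
        have hlw := hlc w hw c hc
        rw [pv_wbl2_getD allowed hnd c hlw.1 hlw.2] at hx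
        by_cases hrel : pvRel allowed c = true
        · rw [if_pos hrel] at hx
          obtain ⟨hxa, hxc⟩ := List.mem_filter.mp hx
          refine ⟨hxa, ?_⟩
          unfold pvPredB
          rw [List.any_eq_true]
          exact ⟨c, hc, by rw [Bool.and_eq_true_iff]; exact ⟨hxc, hrel⟩⟩
        · rw [if_neg hrel] at hx
          exact absurd hx (List.not_mem_nil)
    · rintro ⟨hxa, hxp⟩
      right
      unfold pvPredB at hxp
      rw [List.any_eq_true] at hxp
      obtain ⟨c, hc, hcc⟩ := hxp
      rw [Bool.and_eq_true_iff] at hcc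
      have hlw := hlc w hw c hc
      refine ⟨c, (PySem.Set.mem_ofList _ _).mpr hc, ?_⟩
      rw [pv_wbl2_getD allowed hnd c hlw.1 hlw.2, if_pos hcc.2]
      exact List.mem_filter.mpr ⟨hxa, hcc.1⟩
  have hnodup : tmp.Nodup := pv_union_fold_nodup _ _ _ List.nodup_nil
  have hperm : tmp.Perm (allowed.filter (pvPredB allowed w)) :=
    (List.perm_ext_iff_of_nodup hnodup (hnd.filter _)).mpr hmem
  unfold pvScore
  rw [← hperm.length_eq]
  simp [PySem.Set.len]

theorem pv_A_list (allowed : List String) (all_words : List String) (rl el : List (String × Option Int))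
    (hnd : allowed.Nodup) (hlc : ∀ u ∈ allowed, ∀ c ∈ u.toList, 'a' ≤ c ∧ c ≤ 'z') :
    get_most_unique_score_look_at_allowed_words allowed all_words rl el
      = PySem.List.sorted2 (allowed.map (fun w => ((pvScore allowed w : Int), w)))
          (fun p => p.1) (fun p => p.2) true := by
  unfold get_most_unique_score_look_at_allowed_words
  simp only [PySem.List.foldl_append_singleton_eq_map, List.nil_append]
  congr 1
  apply List.map_congr_left
  intro w hw
  rw [zero_add]
  exact congrArg (fun z => (z, w)) (pv_tmp_score allowed hnd hlc w hw)

-- ---- B side ----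
def pvMaskN (w : String) : Nat := w.toList.foldl (fun m c => m ||| (1 <<< (c.toNat - 97))) 0
def pvAllN : Nat := 2 ^ 26 - 1
def pvCommonN (allowed : List String) : Nat := (allowed.map pvMaskN).foldl (fun a b => a &&& b) pvAllN
def pvRN (allowed : List String) (w : String) : Nat := pvMaskN w &&& (pvCommonN allowed ^^^ pvAllN)

theorem pv_int_shift_cast (k : Nat) : ((1 : Int) <<< k) = ((1 <<< k : Nat) : Int) := by
  simp [Int.shiftLeft_eq, Nat.shiftLeft_eq]

theorem pv_mask_cast (w : String) (h : ∀ c ∈ w.toList, 'a' ≤ c ∧ c ≤ 'z') :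
    (w.toList.foldl (fun m c => PySem.Int.bor m ((1 : Int) <<< ((c.toNat : Int) - 97).toNat)) 0)
      = ((pvMaskN w : Nat) : Int) := by
  unfold pvMaskN
  generalize hl : w.toList = l at h ⊢
  clear hl
  suffices H : ∀ (a : Nat), (l.foldl (fun m c => PySem.Int.bor m ((1 : Int) <<< ((c.toNat : Int) - 97).toNat)) (a : Int))
      = ((l.foldl (fun m c => m ||| (1 <<< (c.toNat - 97))) a : Nat) : Int) by
    exact H 0
  induction l with
  | nil => intro a; rfl
  | cons c l ih =>
      intro a
      have hc : 97 ≤ c.toNat := (h c (by simp)).1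
      have e1 : (((c.toNat : Int) - 97)).toNat = c.toNat - 97 := by omega
      simp only [List.foldl_cons, e1, pv_int_shift_cast, PySem.Int.bor_natCast]
      exact ih (fun c hc => h c (by simp [hc])) _

theorem pv_band_fold_cast (l : List Nat) (a : Nat) :
    ((l.map (fun (n : Nat) => (n : Int))).foldl (fun x y => PySem.Int.band x y) (a : Int))
      = ((l.foldl (fun x y => x &&& y) a : Nat) : Int) := by
  induction l generalizing a with
  | nil => rfl
  | cons n l ih => simp only [List.map_cons, List.foldl_cons, PySem.Int.band_natCast]; exact ih _

theorem pv_testBit_fold_or (l : List Char) (a : Nat) (i : Nat) :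
    ((l.foldl (fun m c => m ||| (1 <<< (c.toNat - 97))) a).testBit i)
      = (a.testBit i || l.any (fun c => c.toNat - 97 == i)) := by
  induction l generalizing a with
  | nil => simp
  | cons c l ih =>
      simp only [List.foldl_cons, ih, List.any_cons]
      rw [Nat.testBit_or, Nat.one_shiftLeft, Nat.testBit_two_pow]
      by_cases h : c.toNat - 97 = i
      · simp [h]
      · have hb : (c.toNat - 97 == i) = false := by simp [h]
        simp [hb, h]

theorem pv_testBit_maskN (w : String) (i : Nat) :
    ((pvMaskN w).testBit i = true) ↔ ∃ c ∈ w.toList, c.toNat - 97 = i := by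
  unfold pvMaskN; rw [pv_testBit_fold_or]; simp

theorem pv_testBit_fold_and (l : List Nat) (a : Nat) (i : Nat) :
    ((l.foldl (fun a b => a &&& b) a).testBit i) = (a.testBit i && l.all (fun m => m.testBit i)) := by
  induction l generalizing a with
  | nil => simp
  | cons m l ih =>
      simp only [List.foldl_cons, ih, List.all_cons, Nat.testBit_and]
      rw [Bool.and_assoc]

theorem pv_bit_pred (allowed : List String)
    (hlc : ∀ u ∈ allowed, ∀ c ∈ u.toList, 'a' ≤ c ∧ c ≤ 'z')
    (w : String) (hw : w ∈ allowed) (w2 : String) (hw2 : w2 ∈ allowed) :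
    (pvMaskN w2 &&& pvRN allowed w) ≠ 0 ↔ pvPredB allowed w w2 = true := by
  have hbounds : ∀ u, u ∈ allowed → ∀ c ∈ u.toList, 97 ≤ c.toNat ∧ c.toNat ≤ 122 := by
    intro u hu c hc
    exact ⟨(hlc u hu c hc).1, (hlc u hu c hc).2⟩
  constructor
  · intro hne
    obtain ⟨i, hi⟩ := Nat.exists_testBit_of_ne_zero hne
    rw [Nat.testBit_and] at hi
    have h2 : (pvMaskN w2).testBit i = true := (Bool.and_eq_true_iff.mp hi).1
    have hr : (pvRN allowed w).testBit i = true := (Bool.and_eq_true_iff.mp hi).2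
    unfold pvRN at hr
    rw [Nat.testBit_and] at hr
    have hm : (pvMaskN w).testBit i = true := (Bool.and_eq_true_iff.mp hr).1
    have hx : ((pvCommonN allowed ^^^ pvAllN)).testBit i = true := (Bool.and_eq_true_iff.mp hr).2
    obtain ⟨c, hcw, hci⟩ := (pv_testBit_maskN w i).mp hm
    obtain ⟨c2, hc2w, hc2i⟩ := (pv_testBit_maskN w2 i).mp h2
    have hc97 := hbounds w hw c hcw
    have hc297 := hbounds w2 hw2 c2 hc2w
    have hceq : c2 = c := pv_char_eq _ _ (by omega)
    have hi26 : i < 26 := by omega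
    have hall : pvAllN.testBit i = true := by
      unfold pvAllN; rw [Nat.testBit_two_pow_sub_one]; simpa
    rw [Nat.testBit_xor, hall] at hx
    have hcommon : (pvCommonN allowed).testBit i = false := by
      cases h : (pvCommonN allowed).testBit i
      · rfl
      · rw [h] at hx; simp at hx
    unfold pvCommonN at hcommon
    rw [pv_testBit_fold_and, hall, Bool.true_and] at hcommon
    obtain ⟨m, hm', hmi⟩ := List.all_eq_false.mp hcommon
    obtain ⟨u, hu, hum⟩ := List.mem_map.mp hm'
    unfold pvPredB
    rw [List.any_eq_true]
    refine ⟨c, hcw, ?_⟩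
    rw [Bool.and_eq_true_iff]
    constructor
    · exact List.contains_iff_mem.mpr (hceq ▸ hc2w)
    · unfold pvRel
      rw [Bool.not_eq_true', List.all_eq_false]
      refine ⟨u, hu, ?_⟩
      intro hcontra
      have : (pvMaskN u).testBit i = true :=
        (pv_testBit_maskN u i).mpr ⟨c, List.contains_iff_mem.mp hcontra, hci⟩
      rw [hum] at this
      rw [this] at hmi
      simp at hmi
  · intro hp
    unfold pvPredB at hp
    rw [List.any_eq_true] at hp
    obtain ⟨c, hcw, hcc⟩ := hp
    rw [Bool.and_eq_true_iff] at hcc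
    obtain ⟨hcw2, hrel⟩ := hcc
    unfold pvRel at hrel
    rw [Bool.not_eq_true', List.all_eq_false] at hrel
    obtain ⟨u, hu, hcu⟩ := hrel
    have hc97 := hbounds w hw c hcw
    set i := c.toNat - 97 with hi
    have hi26 : i < 26 := by omega
    have hb2 : (pvMaskN w2).testBit i = true :=
      (pv_testBit_maskN w2 i).mpr ⟨c, List.contains_iff_mem.mp hcw2, rfl⟩
    have hbw : (pvMaskN w).testBit i = true := (pv_testBit_maskN w i).mpr ⟨c, hcw, rfl⟩
    have hall : pvAllN.testBit i = true := by
      unfold pvAllN; rw [Nat.testBit_two_pow_sub_one]; simpa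
    have hbu : (pvMaskN u).testBit i = false := by
      cases h : (pvMaskN u).testBit i
      · rfl
      · obtain ⟨c', hc'u, hc'i⟩ := (pv_testBit_maskN u i).mp h
        have hc'97 := hbounds u hu c' hc'u
        have : c' = c := pv_char_eq _ _ (by omega)
        rw [this] at hc'u
        exact absurd (List.contains_iff_mem.mpr hc'u) hcu
    have hcommon : (pvCommonN allowed).testBit i = false := by
      unfold pvCommonN
      rw [pv_testBit_fold_and]
      rw [Bool.and_eq_false_iff]
      right
      rw [List.all_eq_false]
      exact ⟨pvMaskN u, List.mem_map.mpr ⟨u, hu, rfl⟩, by simp [hbu]⟩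
    intro h0
    have : (pvMaskN w2 &&& pvRN allowed w).testBit i = true := by
      rw [Nat.testBit_and, hb2, Bool.true_and]
      unfold pvRN
      rw [Nat.testBit_and, hbw, Bool.true_and, Nat.testBit_xor, hcommon, hall]
      rfl
    rw [h0] at this
    simp at this

theorem pv_zip_self_map {α β : Type} (f : α → β) (l : List α) :
    l.zip (l.map f) = l.map (fun x => (x, f x)) := by
  induction l with
  | nil => rfl
  | cons a l ih => simp [ih]

theorem pv_B_list (allowed : List String) (all_words : List String) (rl el : List (String × Option Int))
    (hnd : allowed.Nodup) (hlc : ∀ u ∈ allowed, ∀ c ∈ u.toList, 'a' ≤ c ∧ c ≤ 'z') :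
    get_most_unique_score_look_at_allowed_words_alt allowed all_words rl el
      = PySem.List.sorted2 (allowed.map (fun w => ((pvScore allowed w : Int), w)))
          (fun p => p.1) (fun p => p.2) true := by
  unfold get_most_unique_score_look_at_allowed_words_alt
  simp only [PySem.List.foldl_append_singleton_eq_map, List.nil_append]
  rw [pv_zip_self_map, List.map_map]
  congr 1
  apply List.map_congr_left
  intro w hw
  simp only [Function.comp_apply]
  have hmaskmap : allowed.map (fun x => x.toList.foldl (fun m c =>
        PySem.Int.bor m ((1 : Int) <<< ((c.toNat : Int) - 97).toNat)) 0)
      = (allowed.map pvMaskN).map (fun (n : Nat) => (n : Int)) := by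
    rw [List.map_map]
    apply List.map_congr_left
    intro u hu
    exact pv_mask_cast u (hlc u hu)
  have hALL : ((1 <<< 26 : Nat) : Int) - 1 = ((pvAllN : Nat) : Int) := by decide
  have hcommon : (allowed.map (fun x => x.toList.foldl (fun m c =>
        PySem.Int.bor m ((1 : Int) <<< ((c.toNat : Int) - 97).toNat)) 0)).foldl
          (fun common m => PySem.Int.band common m) (((1 <<< 26 : Nat) : Int) - 1)
      = ((pvCommonN allowed : Nat) : Int) := by
    rw [hmaskmap, hALL, pv_band_fold_cast]
    rfl
  have hmw : (w.toList.foldl (fun m c =>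
        PySem.Int.bor m ((1 : Int) <<< ((c.toNat : Int) - 97).toNat)) 0) = ((pvMaskN w : Nat) : Int) :=
    pv_mask_cast w (hlc w hw)
  have hr : PySem.Int.band (w.toList.foldl (fun m c =>
        PySem.Int.bor m ((1 : Int) <<< ((c.toNat : Int) - 97).toNat)) 0)
        (PySem.Int.bxor ((allowed.map (fun x => x.toList.foldl (fun m c =>
          PySem.Int.bor m ((1 : Int) <<< ((c.toNat : Int) - 97).toNat)) 0)).foldl
            (fun common m => PySem.Int.band common m) (((1 <<< 26 : Nat) : Int) - 1))
          (((1 <<< 26 : Nat) : Int) - 1))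
      = ((pvRN allowed w : Nat) : Int) := by
    rw [hmw, hcommon, hALL, PySem.Int.bxor_natCast, PySem.Int.band_natCast]
    rfl
  rw [Prod.mk.injEq]
  refine ⟨?_, rfl⟩
  rw [hr, hmaskmap, List.map_map, List.map_map]
  have hterm : allowed.map (((fun m2 => if PySem.Int.band m2 ((pvRN allowed w : Nat) : Int) ≠ 0
        then (1 : Int) else 0) ∘ (fun (n : Nat) => (n : Int))) ∘ pvMaskN)
      = allowed.map (fun u => if pvPredB allowed w u = true then (1 : Int) else 0) := by
    apply List.map_congr_left
    intro u hu
    simp only [Function.comp_apply, PySem.Int.band_natCast]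
    refine if_congr ?_ rfl rfl
    rw [Int.natCast_ne_zero]
    exact pv_bit_pred allowed hlc w hw u hu
  rw [hterm, PySem.List.sum_map_ite_one_zero]
  unfold pvScore
  rw [← List.countP_eq_length_filter]

-- ---- final assembly ----
theorem pv_main (allowed : List String) (all_words : List String) (rl el : List (String × Option Int))
    (hnd : allowed.Nodup) (hlc : ∀ w ∈ allowed, ∀ c ∈ w.toList, 'a' ≤ c ∧ c ≤ 'z') :
    get_most_unique_score_look_at_allowed_words allowed all_words rl el
      = get_most_unique_score_look_at_allowed_words_alt allowed all_words rl el := by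
  rw [pv_A_list allowed all_words rl el hnd hlc, pv_B_list allowed all_words rl el hnd hlc]

-- ===== VERDICT (by name: the statement is the Claim_ definition above) =====
theorem get_most_unique_score_look_at_allowed_words_spec : Claim_equal_get_most_unique_score_look_at_allowed_words := by
  intro allowed all_words rl el _hdom hpre
  refine pv_main allowed all_words rl el hpre.1 ?_
  intro w hw c hc
  have h1 := List.all_eq_true.mp hpre.2 w hw
  have h2 := List.all_eq_true.mp h1 c hc
  simpa using h2
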